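-- pv_equiv track=rewrite | github.com/IllierZer/Path-Planning | local_avoidance.py | clear
-- ===== SOURCE A (Python) =====
-- def clear(a):
--     clear  = False
--     ref = 0
--     l = len(a)
--     for i in range(l):
--         streak = 0
--         if a[i]==ref:
--             for j in range(i,l):
--                 if a[j] == a[i]:
--                     streak += 1
--                 else:
--                     i = j
--                     break
--                 if streak == 6:
--                     clear = True
--     return clear
-- ===== SOURCE B (Python) =====
-- def clear(a):
--     streak = 0
--     for x in a:
--         if x == 0:
--             streak += 1
--             if streak == 6:
--                 return True
--         else:
--             streak = 0
--     return False
-- ===== Notes on version B (the rewrite author's own statement) =====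
-- stated objective: simpler
-- what changed: Replaced the nested rescan-from-each-zero-index loops by a single pass that keeps a running count of consecutive zeros and returns as soon as it reaches 6.
import Mathlib
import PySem

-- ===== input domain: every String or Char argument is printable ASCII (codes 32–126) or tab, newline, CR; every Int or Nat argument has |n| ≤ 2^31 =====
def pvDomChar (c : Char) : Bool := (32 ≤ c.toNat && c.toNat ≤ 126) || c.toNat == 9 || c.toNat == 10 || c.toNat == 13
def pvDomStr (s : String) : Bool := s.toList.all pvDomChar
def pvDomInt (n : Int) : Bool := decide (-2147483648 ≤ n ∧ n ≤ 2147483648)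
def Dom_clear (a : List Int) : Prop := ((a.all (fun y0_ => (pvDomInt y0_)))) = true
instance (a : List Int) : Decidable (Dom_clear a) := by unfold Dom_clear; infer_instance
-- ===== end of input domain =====

-- B replaces A's rescan-from-each-zero nested loops with a single pass counting consecutive zeros (objective: simpler).

-- ===== PORT A =====
-- inner 'for j in range(i, l)' with break; Python's 'i = j' before break only rebinds the
-- (dead) loop variable of the outer 'for', so it has no effect and is not ported.
-- a.getD j 0 = a[j]: j is always in range here (j < l = len(a)), so IndexError is impossible.
def clearInnerA (a : List Int) (ai : Int) (l : Nat) (j : Nat) (streak : Nat) (cl : Bool) : Bool :=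
  if j < l then
    if a.getD j 0 == ai then
      let streak' := streak + 1
      let cl' := if streak' == 6 then true else cl
      clearInnerA a ai l (j + 1) streak' cl'
    else cl
  else cl
termination_by l - j

def clearOuterA (a : List Int) (l : Nat) (i : Nat) (cl : Bool) : Bool :=
  if i < l then
    let cl' := if a.getD i 0 == (0 : Int) then clearInnerA a (a.getD i 0) l i 0 cl else cl
    clearOuterA a l (i + 1) cl'
  else cl
termination_by l - i

def clear (a : List Int) : Bool := clearOuterA a a.length 0 false

-- ===== PORT B =====
def clearAltLoop : List Int → Nat → Bool
  | [], _ => false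
  | x :: xs, streak =>
    if x == 0 then
      if streak + 1 == 6 then true else clearAltLoop xs (streak + 1)
    else clearAltLoop xs 0

def clear_alt (a : List Int) : Bool := clearAltLoop a 0

-- ===== PRECONDITION & SPEC =====
def Spec_clear (a : List Int) (out : Bool) : Prop := out = clear_alt a
instance (a : List Int) (out : Bool) : Decidable (Spec_clear a out) := by unfold Spec_clear; infer_instance

-- ===== CLAIM (what is proved, stated in full; the proofs are below) =====
def Claim_equal_clear : Prop := ∀ (a : List Int), Dom_clear a → Spec_clear a (clear a)

-- ===== LEMMAS AND PROOFS =====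

theorem replicate_prefix_replicate {m n : Nat} {c : Int} (h : m ≤ n) :
    List.replicate m c <+: List.replicate n c :=
  ⟨List.replicate (n - m) c, by rw [← List.replicate_add]; congr 1; omega⟩

theorem alt_iff (a : List Int) (s : Nat) (hs : s < 6) :
    clearAltLoop a s = true ↔
      (∃ k, s + k = 6 ∧ List.replicate k (0 : Int) <+: a) ∨
        List.replicate 6 (0 : Int) <:+: a := by
  induction a generalizing s with
  | nil =>
    simp only [clearAltLoop]
    constructor
    · intro h; exact absurd h (by simp)
    · rintro (⟨k, hk, hp⟩ | hinf)
      · have := hp.length_le; simp at this; omega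
      · have := hinf.length_le; simp at this
  | cons x xs ih =>
    simp only [clearAltLoop]
    by_cases hx : x = 0
    · subst hx
      simp only [beq_self_eq_true, if_true]
      by_cases h6 : s + 1 = 6
      · have he : (s + 1 == 6) = true := beq_iff_eq.mpr h6
        simp only [he, if_true]
        constructor
        · intro _
          refine Or.inl ⟨1, by omega, ?_⟩
          rw [show List.replicate 1 (0 : Int) = [0] from rfl]
          exact ⟨xs, rfl⟩
        · intro _; trivial
      · have he : (s + 1 == 6) = false := beq_eq_false_iff_ne.mpr h6
        simp only [he, Bool.false_eq_true, if_false]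
        rw [ih (s + 1) (by omega)]
        constructor
        · rintro (⟨k, hk, hp⟩ | hinf)
          · refine Or.inl ⟨k + 1, by omega, ?_⟩
            rw [List.replicate_succ]
            exact List.cons_prefix_cons.mpr ⟨rfl, hp⟩
          · exact Or.inr (hinf.trans (List.suffix_cons (0 : Int) xs).isInfix)
        · rintro (⟨k, hk, hp⟩ | hinf)
          · obtain ⟨k', rfl⟩ : ∃ k', k = k' + 1 := ⟨k - 1, by omega⟩
            rw [List.replicate_succ, List.cons_prefix_cons] at hp
            exact Or.inl ⟨k', by omega, hp.2⟩
          · rcases List.infix_cons_iff.mp hinf with hpre | hinf'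
            · rw [List.replicate_succ, List.cons_prefix_cons] at hpre
              exact Or.inl ⟨5 - s, by omega,
                (replicate_prefix_replicate (by omega)).trans hpre.2⟩
            · exact Or.inr hinf'
    · have he : (x == (0 : Int)) = false := beq_eq_false_iff_ne.mpr hx
      simp only [he, Bool.false_eq_true, if_false]
      rw [ih 0 (by omega)]
      constructor
      · rintro (⟨k, hk, hp⟩ | hinf)
        · have : k = 6 := by omega
          subst this
          exact Or.inr (hp.isInfix.trans (List.suffix_cons x xs).isInfix)
        · exact Or.inr (hinf.trans (List.suffix_cons x xs).isInfix)
      · rintro (⟨k, hk, hp⟩ | hinf)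
        · obtain ⟨k', rfl⟩ : ∃ k', k = k' + 1 := ⟨k - 1, by omega⟩
          rw [List.replicate_succ, List.cons_prefix_cons] at hp
          exact absurd hp.1.symm hx
        · rcases List.infix_cons_iff.mp hinf with hpre | hinf'
          · rw [List.replicate_succ, List.cons_prefix_cons] at hpre
            exact absurd hpre.1.symm hx
          · exact Or.inr hinf'

theorem innerA_true (a : List Int) (ai : Int) (l j streak : Nat) :
    clearInnerA a ai l j streak true = true := by
  induction hn : l - j using Nat.strong_induction_on generalizing j streak with
  | _ n ihn =>
  rw [clearInnerA]
  by_cases hj : j < l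
  · rw [if_pos hj]
    by_cases hz : (a.getD j 0 == ai) = true
    · rw [if_pos hz]
      show clearInnerA a ai l (j + 1) (streak + 1) (if (streak + 1 == 6) = true then true else true) = true
      rw [ite_self]
      exact ihn (l - (j + 1)) (by omega) (j + 1) (streak + 1) rfl
    · rw [if_neg hz]
  · rw [if_neg hj]

theorem innerA_iff (a : List Int) (j streak : Nat) (cl : Bool) (hs : streak < 6) :
    clearInnerA a 0 a.length j streak cl = true ↔
      cl = true ∨ ∃ m, streak + m = 6 ∧ List.replicate m (0 : Int) <+: a.drop j := by
  induction hn : a.length - j using Nat.strong_induction_on generalizing j streak cl with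
  | _ n ihn =>
  rw [clearInnerA]
  by_cases hj : j < a.length
  · have hdrop : a.drop j = a.getD j 0 :: a.drop (j + 1) := by
      rw [List.getD_eq_getElem a 0 hj]
      exact List.drop_eq_getElem_cons hj
    rw [if_pos hj]
    by_cases hz : a.getD j 0 = 0
    · have he : (a.getD j 0 == (0 : Int)) = true := beq_iff_eq.mpr hz
      rw [if_pos he]
      by_cases h6 : streak + 1 = 6
      · have hb : (streak + 1 == 6) = true := beq_iff_eq.mpr h6
        show clearInnerA a 0 a.length (j + 1) (streak + 1)
            (if (streak + 1 == 6) = true then true else cl) = true ↔ _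
        rw [if_pos hb, innerA_true]
        constructor
        · intro _
          refine Or.inr ⟨1, by omega, ?_⟩
          rw [hdrop, hz]
          exact ⟨a.drop (j + 1), rfl⟩
        · intro _; trivial
      · have hb : (streak + 1 == 6) = false := beq_eq_false_iff_ne.mpr h6
        show clearInnerA a 0 a.length (j + 1) (streak + 1)
            (if (streak + 1 == 6) = true then true else cl) = true ↔ _
        rw [hb]
        simp only [Bool.false_eq_true, if_false]
        rw [ihn (a.length - (j + 1)) (by omega) (j + 1) (streak + 1) cl (by omega) rfl]
        constructor
        · rintro (hcl | ⟨m, hm, hp⟩)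
          · exact Or.inl hcl
          · refine Or.inr ⟨m + 1, by omega, ?_⟩
            rw [hdrop, hz, List.replicate_succ]
            exact List.cons_prefix_cons.mpr ⟨rfl, hp⟩
        · rintro (hcl | ⟨m, hm, hp⟩)
          · exact Or.inl hcl
          · obtain ⟨m', rfl⟩ : ∃ m', m = m' + 1 := ⟨m - 1, by omega⟩
            rw [hdrop, hz, List.replicate_succ, List.cons_prefix_cons] at hp
            exact Or.inr ⟨m', by omega, hp.2⟩
    · have he : (a.getD j 0 == (0 : Int)) = false := beq_eq_false_iff_ne.mpr hz
      rw [he]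
      simp only [Bool.false_eq_true, if_false]
      constructor
      · exact Or.inl
      · rintro (hcl | ⟨m, hm, hp⟩)
        · exact hcl
        · obtain ⟨m', rfl⟩ : ∃ m', m = m' + 1 := ⟨m - 1, by omega⟩
          rw [hdrop, List.replicate_succ, List.cons_prefix_cons] at hp
          exact absurd hp.1.symm hz
  · rw [if_neg hj]
    constructor
    · exact Or.inl
    · rintro (hcl | ⟨m, hm, hp⟩)
      · exact hcl
      · have hlen := hp.length_le
        rw [List.length_drop, List.length_replicate] at hlen
        omega

theorem outerA_iff (a : List Int) (i : Nat) (cl : Bool) :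
    clearOuterA a a.length i cl = true ↔
      cl = true ∨ ∃ j, i ≤ j ∧ List.replicate 6 (0 : Int) <+: a.drop j := by
  induction hn : a.length - i using Nat.strong_induction_on generalizing i cl with
  | _ n ihn =>
  rw [clearOuterA]
  by_cases hi : i < a.length
  · rw [if_pos hi]
    rw [ihn (a.length - (i + 1)) (by omega) (i + 1) _ rfl]
    by_cases hz : a.getD i 0 = 0
    · have he : (a.getD i 0 == (0 : Int)) = true := beq_iff_eq.mpr hz
      rw [if_pos he, hz, innerA_iff a i 0 cl (by omega)]
      constructor
      · rintro ((hcl | ⟨m, hm, hp⟩) | ⟨j, hj, hp⟩)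
        · exact Or.inl hcl
        · have : m = 6 := by omega
          subst this
          exact Or.inr ⟨i, le_refl i, hp⟩
        · exact Or.inr ⟨j, by omega, hp⟩
      · rintro (hcl | ⟨j, hj, hp⟩)
        · exact Or.inl (Or.inl hcl)
        · by_cases hji : j = i
          · subst hji
            exact Or.inl (Or.inr ⟨6, by omega, hp⟩)
          · exact Or.inr ⟨j, by omega, hp⟩
    · have he : (a.getD i 0 == (0 : Int)) = false := beq_eq_false_iff_ne.mpr hz
      rw [he]
      simp only [Bool.false_eq_true, if_false]
      constructor
      · rintro (hcl | ⟨j, hj, hp⟩)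
        · exact Or.inl hcl
        · exact Or.inr ⟨j, by omega, hp⟩
      · rintro (hcl | ⟨j, hj, hp⟩)
        · exact Or.inl hcl
        · by_cases hji : j = i
          · subst hji
            have hdrop : a.drop j = a.getD j 0 :: a.drop (j + 1) := by
              rw [List.getD_eq_getElem a 0 hi]
              exact List.drop_eq_getElem_cons hi
            rw [hdrop, List.replicate_succ, List.cons_prefix_cons] at hp
            exact absurd hp.1.symm hz
          · exact Or.inr ⟨j, by omega, hp⟩
  · rw [if_neg hi]
    constructor
    · exact Or.inl
    · rintro (hcl | ⟨j, hj, hp⟩)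
      · exact hcl
      · have hlen := hp.length_le
        rw [List.length_drop, List.length_replicate] at hlen
        omega

theorem infix_iff_prefix_drop (t a : List Int) :
    t <:+: a ↔ ∃ j, t <+: a.drop j := by
  constructor
  · rintro ⟨p, q, rfl⟩
    refine ⟨p.length, ?_⟩
    rw [List.append_assoc, List.drop_left]
    exact ⟨q, rfl⟩
  · rintro ⟨j, r, hr⟩
    exact ⟨a.take j, r, by rw [List.append_assoc, hr, List.take_append_drop]⟩

theorem clear_eq_alt (a : List Int) : clear a = clear_alt a := by
  have hA : clear a = true ↔ List.replicate 6 (0 : Int) <:+: a := by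
    rw [clear, outerA_iff a 0 false, infix_iff_prefix_drop]
    constructor
    · rintro (h | ⟨j, _, hp⟩)
      · exact absurd h (by simp)
      · exact ⟨j, hp⟩
    · rintro ⟨j, hp⟩
      exact Or.inr ⟨j, Nat.zero_le j, hp⟩
  have hB : clear_alt a = true ↔ List.replicate 6 (0 : Int) <:+: a := by
    rw [clear_alt, alt_iff a 0 (by omega)]
    constructor
    · rintro (⟨k, hk, hp⟩ | hinf)
      · have : k = 6 := by omega
        subst this
        exact hp.isInfix
      · exact hinf
    · exact Or.inr
  rw [Bool.eq_iff_iff, hA, hB]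

-- ===== VERDICT (by name: the statement is the Claim_ definition above) =====
theorem clear_spec : Claim_equal_clear := by
  intro a _
  unfold Spec_clear
  exact clear_eq_alt a
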